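-- pv_equiv track=rewrite | github.com/naveencmy/AuthDoc_v3 | backend/python/layout_analyzer.py | group_paragraphs
-- ===== SOURCE A (Python) =====
-- def group_paragraphs(blocks, gap=25):
--     paragraphs = []
--     current = []
--     last_y = None
--     for block in sorted(blocks, key=lambda b: b["y"]):
--         if last_y is None:
--             current.append(block)
--         elif abs(block["y"] - last_y) < gap:
--             current.append(block)
--         else:
--             paragraphs.append(current)
--             current = [block]
--         last_y = block["y"]
--     if current:
--         paragraphs.append(current)
--     return paragraphs
-- ===== SOURCE B (Python) =====
-- def group_paragraphs(blocks, gap=25):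
--     s = sorted(blocks, key=lambda b: b["y"])
--     if not s:
--         return []
--     # staged: (1) find all boundary indices where the vertical gap between
--     # adjacent sorted blocks reaches `gap`, (2) cut the sorted list at them.
--     bounds = [0]
--     bounds += [i for i, (p, q) in enumerate(zip(s, s[1:]), 1)
--                if abs(q["y"] - p["y"]) >= gap]
--     bounds.append(len(s))
--     return [s[a:b] for a, b in zip(bounds, bounds[1:])]
-- ===== Notes on version B (the rewrite author's own statement) =====
-- stated objective: alternative
-- what changed: B is staged: it first computes the list of boundary indices (one comprehension over adjacent pairs of the sorted list) and then cuts the sorted list into slices between consecutive boundaries, instead of A's single forward loop threading a current-group/last_y accumulator with an end-of-loop flush.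
import Mathlib
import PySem

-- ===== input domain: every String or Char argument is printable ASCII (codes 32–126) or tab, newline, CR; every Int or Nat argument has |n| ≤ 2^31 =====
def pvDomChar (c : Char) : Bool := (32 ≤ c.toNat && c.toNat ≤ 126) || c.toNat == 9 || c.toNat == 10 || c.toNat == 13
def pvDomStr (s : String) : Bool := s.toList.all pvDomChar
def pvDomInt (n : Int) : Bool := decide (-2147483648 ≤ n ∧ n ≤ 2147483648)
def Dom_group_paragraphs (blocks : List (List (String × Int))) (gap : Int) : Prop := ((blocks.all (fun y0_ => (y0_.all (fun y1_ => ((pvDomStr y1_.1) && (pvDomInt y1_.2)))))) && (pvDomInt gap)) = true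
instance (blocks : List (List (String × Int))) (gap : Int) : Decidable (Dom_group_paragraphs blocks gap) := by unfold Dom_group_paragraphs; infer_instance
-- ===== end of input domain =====

-- B computes all boundary indices first and then slices the sorted list between consecutive
-- boundaries (staged passes), where A runs one forward loop with a current/last_y accumulator
-- and a flush after the loop; same cost, different decomposition.

-- b["y"] (first match in the assoc list); total via getD 0 — Pre_ guarantees the key is present.
def pvGetY (b : List (String × Int)) : Int := ((PySem.Dict.mk b).get? "y").getD 0

-- ===== PORT A =====
-- one step of A's loop body; state = (paragraphs, current, last_y)
def pvStepA (gap : Int)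
    (st : List (List (List (String × Int))) × List (List (String × Int)) × Option Int)
    (block : List (String × Int)) :
    List (List (List (String × Int))) × List (List (String × Int)) × Option Int :=
  match st with
  | (paragraphs, current, lastY) =>
    match lastY with
    | none => (paragraphs, current ++ [block], some (pvGetY block))
    | some ly =>
      if |pvGetY block - ly| < gap then (paragraphs, current ++ [block], some (pvGetY block))
      else (paragraphs ++ [current], [block], some (pvGetY block))

def group_paragraphs (blocks : List (List (String × Int))) (gap : Int) : List (List (List (String × Int))) :=
  let st := (PySem.List.sorted blocks (fun b => pvGetY b)).foldl (pvStepA gap) ([], [], none)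
  if st.2.1 ≠ [] then st.1 ++ [st.2.1] else st.1

-- ===== PORT B =====
-- the boundary-index comprehension: [i for i, (p, q) in enumerate(zip(s, s[1:]), 1) if abs(q["y"] - p["y"]) >= gap]
def pvBrks (gap : Int) (s : List (List (String × Int))) : List Int :=
  (PySem.List.enumerate (s.zip s.tail) 1).filterMap
    (fun ipq => if gap ≤ |pvGetY ipq.2.2 - pvGetY ipq.2.1| then some ipq.1 else none)

-- [s[a:b] for a, b in zip(bounds, bounds[1:])]  (bounds[1:] = tail; bounds is nonempty)
def pvCuts (s : List (List (String × Int))) (bounds : List Int) : List (List (List (String × Int))) :=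
  (bounds.zip bounds.tail).map (fun ab => PySem.List.slice s (some ab.1) (some ab.2))

def group_paragraphs_alt (blocks : List (List (String × Int))) (gap : Int) : List (List (List (String × Int))) :=
  let s := PySem.List.sorted blocks (fun b => pvGetY b)
  if s.isEmpty then []
  else pvCuts s (((0 : Int) :: pvBrks gap s) ++ [(s.length : Int)])

-- ===== PRECONDITION & SPEC =====
-- Pre_: every block has a "y" key (otherwise Python A raises KeyError inside sorted's key).
def Pre_group_paragraphs (blocks : List (List (String × Int))) (_gap : Int) : Prop :=
  ∀ b ∈ blocks, ((PySem.Dict.mk b).get? "y").isSome = true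
instance (blocks : List (List (String × Int))) (gap : Int) : Decidable (Pre_group_paragraphs blocks gap) := by unfold Pre_group_paragraphs; infer_instance
def pvWitness_group_paragraphs : (List (List (String × Int))) × Int := ([[("y", 10)], [("y", 100)], [("y", 101)]], 25)

def Spec_group_paragraphs (blocks : List (List (String × Int))) (gap : Int) (out : List (List (List (String × Int)))) : Prop := out = group_paragraphs_alt blocks gap
instance (blocks : List (List (String × Int))) (gap : Int) (out : List (List (List (String × Int)))) : Decidable (Spec_group_paragraphs blocks gap out) := by unfold Spec_group_paragraphs; infer_instance

-- ===== CLAIM (what is proved, stated in full; the proofs are below) =====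
def Claim_equal_group_paragraphs : Prop := ∀ (blocks : List (List (String × Int))) (gap : Int), Dom_group_paragraphs blocks gap → Pre_group_paragraphs blocks gap → Spec_group_paragraphs blocks gap (group_paragraphs blocks gap)

-- ===== LEMMAS AND PROOFS =====

-- proof-side reference: the adjacency grouping of x :: rest = (group containing x, later groups)
def pvSplitB (gap : Int) (x : List (String × Int)) :
    List (List (String × Int)) → List (List (String × Int)) × List (List (List (String × Int)))
  | [] => ([x], [])
  | y :: rest =>
    match pvSplitB gap y rest with
    | (g, groups) =>
      if |pvGetY y - pvGetY x| < gap then (x :: g, groups)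
      else ([x], g :: groups)

-- A's fold, started mid-stream with a nonempty current ending in x (last_y = y of x),
-- followed by the final flush, produces exactly ps ++ the grouping of x :: rest.
theorem pv_foldA (gap : Int) :
    ∀ (rest : List (List (String × Int))) (ps : List (List (List (String × Int))))
      (cur : List (List (String × Int))) (x : List (String × Int)),
      (let st := rest.foldl (pvStepA gap) (ps, cur ++ [x], some (pvGetY x))
       if st.2.1 ≠ [] then st.1 ++ [st.2.1] else st.1)
      = ps ++ (cur ++ (pvSplitB gap x rest).1) :: (pvSplitB gap x rest).2 := by
  intro rest
  induction rest with
  | nil =>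
    intro ps cur x
    simp [pvSplitB]
  | cons y t ih =>
    intro ps cur x
    simp only [List.foldl_cons, pvStepA, pvSplitB]
    by_cases h : |pvGetY y - pvGetY x| < gap
    · simp only [if_pos h]
      have := ih ps (cur ++ [x]) y
      simpa [List.append_assoc] using this
    · simp only [if_neg h]
      have := ih (ps ++ [cur ++ [x]]) [] y
      simpa [List.append_assoc] using this

-- enumerate with a start shifted by one
theorem pv_enum_shift {α : Type} (xs : List α) : ∀ (s : Int),
    PySem.List.enumerate xs (s + 1) = (PySem.List.enumerate xs s).map (fun p => (p.1 + 1, p.2)) := by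
  induction xs with
  | nil => intro s; simp [PySem.List.enumerate_nil]
  | cons a l ih =>
    intro s
    rw [PySem.List.enumerate_cons, PySem.List.enumerate_cons, ih (s + 1)]
    simp

-- the boundary comprehension unfolds one adjacent pair at a time
theorem pv_brks_cons (gap : Int) (x y : List (String × Int)) (t : List (List (String × Int))) :
    pvBrks gap (x :: y :: t)
      = (if gap ≤ |pvGetY y - pvGetY x| then [(1 : Int)] else [])
        ++ (pvBrks gap (y :: t)).map (· + 1) := by
  have hfm : ∀ (l : List (Int × (List (String × Int) × List (String × Int)))),
      l.filterMap ((fun ipq => if gap ≤ |pvGetY ipq.2.2 - pvGetY ipq.2.1| then some ipq.1 else none)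
          ∘ (fun p => (p.1 + 1, p.2)))
        = (l.filterMap (fun ipq => if gap ≤ |pvGetY ipq.2.2 - pvGetY ipq.2.1| then some ipq.1 else none)).map (· + 1) := by
    intro l
    rw [List.map_filterMap]
    apply List.filterMap_congr
    intro a _
    by_cases hc : gap ≤ |pvGetY a.2.2 - pvGetY a.2.1| <;> simp [hc]
  unfold pvBrks
  simp only [List.tail_cons, List.zip_cons_cons, PySem.List.enumerate_cons, List.filterMap_cons]
  rw [pv_enum_shift, List.filterMap_map, hfm]
  by_cases h : gap ≤ |pvGetY y - pvGetY x| <;> simp [h]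

theorem pv_brks_nonneg (gap : Int) : ∀ (s : List (List (String × Int))),
    ∀ b ∈ pvBrks gap s, 0 ≤ b := by
  intro s
  induction s with
  | nil => intro b hb; simp [pvBrks, PySem.List.enumerate_nil] at hb
  | cons x rest ih =>
    cases rest with
    | nil => intro b hb; simp [pvBrks, PySem.List.enumerate_nil] at hb
    | cons y t =>
      intro b hb
      rw [pv_brks_cons] at hb
      rcases List.mem_append.mp hb with h | h
      · split_ifs at h <;> simp_all
      · rcases List.mem_map.mp h with ⟨c, hc, rfl⟩
        have := ih c hc
        omega

-- shifting every Int bound by one and consing x onto the list leaves each slice unchanged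
theorem pv_slice_shift (x : List (String × Int)) (s : List (List (String × Int)))
    (a b : Int) (ha : 0 ≤ a) (hb : 0 ≤ b) :
    PySem.List.slice (x :: s) (some (a + 1)) (some (b + 1)) = PySem.List.slice s (some a) (some b) := by
  rw [PySem.List.slice_toNat _ (by omega) (by omega), PySem.List.slice_toNat _ ha hb]
  have h1 : (a + 1).toNat = a.toNat + 1 := by omega
  have h2 : (b + 1).toNat = b.toNat + 1 := by omega
  rw [h1, h2, List.drop_succ_cons]
  congr 1
  omega

-- a head slice s[0:b+1] of x :: s peels off x
theorem pv_slice_head (x : List (String × Int)) (s : List (List (String × Int)))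
    (b : Int) (hb : 0 ≤ b) :
    PySem.List.slice (x :: s) (some 0) (some (b + 1)) = x :: PySem.List.slice s (some 0) (some b) := by
  rw [PySem.List.slice_toNat _ (by omega) (by omega), PySem.List.slice_toNat _ le_rfl hb]
  have h2 : (b + 1).toNat = b.toNat + 1 := by omega
  simp [h2]

-- slicing x :: s between consecutive bounds all shifted by one = slicing s between the originals
theorem pv_cuts_shift (x : List (String × Int)) (s : List (List (String × Int)))
    (w : Int) (W' : List Int) (hW : ∀ b ∈ w :: W', 0 ≤ b) :
    (((w + 1) :: W'.map (· + 1)).zip (W'.map (· + 1))).map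
        (fun ab => PySem.List.slice (x :: s) (some ab.1) (some ab.2))
      = ((w :: W').zip W').map (fun ab => PySem.List.slice s (some ab.1) (some ab.2)) := by
  have h1 : ((w + 1) :: W'.map (· + 1)) = (w :: W').map (· + 1) := by simp
  rw [h1, List.zip_map, List.map_map]
  apply List.map_congr_left
  intro ab hab
  have h2 := List.of_mem_zip hab
  have ha : 0 ≤ ab.1 := hW _ h2.1
  have hb : 0 ≤ ab.2 := hW _ (List.mem_cons_of_mem _ h2.2)
  simpa using pv_slice_shift x s ab.1 ab.2 ha hb

-- B's staged computation on a nonempty sorted list equals the adjacency grouping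
theorem pv_cutsB (gap : Int) :
    ∀ (rest : List (List (String × Int))) (x : List (String × Int)),
      pvCuts (x :: rest) (((0 : Int) :: pvBrks gap (x :: rest)) ++ [((x :: rest).length : Int)])
        = (pvSplitB gap x rest).1 :: (pvSplitB gap x rest).2 := by
  intro rest
  induction rest with
  | nil =>
    intro x
    have hb : pvBrks gap [x] = [] := by
      simp [pvBrks, PySem.List.enumerate_nil]
    rw [hb]
    simp only [pvCuts, pvSplitB, List.cons_append, List.nil_append, List.tail_cons,
      List.zip_cons_cons, List.zip_nil_right, List.map_cons, List.map_nil,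
      List.length_cons, List.length_nil]
    rw [PySem.List.slice_toNat _ le_rfl (by norm_num)]
    simp
  | cons y t ih =>
    intro x
    have hW : ∀ b ∈ pvBrks gap (y :: t) ++ [((y :: t).length : Int)], 0 ≤ b := by
      intro b hb
      rcases List.mem_append.mp hb with h | h
      · exact pv_brks_nonneg gap _ b h
      · simp at h; omega
    have hsub := ih y
    unfold pvCuts at hsub
    simp only [List.cons_append, List.tail_cons] at hsub
    rw [pv_brks_cons]
    by_cases h : gap ≤ |pvGetY y - pvGetY x|
    · -- boundary between x and y: first group is [x]
      simp only [if_pos h, List.singleton_append]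
      unfold pvCuts
      rw [List.cons_append, List.cons_append,
        show (1 : Int) :: ((pvBrks gap (y :: t)).map (· + 1) ++ [((x :: y :: t).length : Int)])
            = ((0 : Int) + 1) :: (pvBrks gap (y :: t) ++ [((y :: t).length : Int)]).map (· + 1) by simp]
      simp only [List.tail_cons, List.zip_cons_cons, List.map_cons]
      rw [pv_cuts_shift x (y :: t) 0 _
        (by intro b hb; rcases List.mem_cons.mp hb with rfl | hb'; exacts [le_refl 0, hW b hb'])]
      rw [pv_slice_head x (y :: t) 0 le_rfl]
      rw [PySem.List.slice_toNat _ le_rfl le_rfl]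
      rw [hsub]
      simp [pvSplitB, not_lt.mpr h]
    · -- no boundary: x joins y's group
      simp only [if_neg h, List.nil_append]
      have hne : (|pvGetY y - pvGetY x| < gap) := lt_of_not_ge h
      obtain ⟨w, W', hw⟩ : ∃ w W', pvBrks gap (y :: t) ++ [((y :: t).length : Int)] = w :: W' := by
        cases hB : pvBrks gap (y :: t) with
        | nil => exact ⟨_, _, rfl⟩
        | cons a l => exact ⟨a, l ++ [((y :: t).length : Int)], by simp⟩
      have hWn := hW
      rw [hw] at hWn
      have hw0 : 0 ≤ w := hWn w (by simp)
      have hsh : (pvBrks gap (y :: t)).map (· + 1) ++ [((x :: y :: t).length : Int)]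
          = (w + 1) :: W'.map (· + 1) := by
        have hm : (pvBrks gap (y :: t)).map (· + 1) ++ [((x :: y :: t).length : Int)]
            = (pvBrks gap (y :: t) ++ [((y :: t).length : Int)]).map (· + 1) := by simp
        rw [hm, hw]; simp
      unfold pvCuts
      rw [List.cons_append, hsh]
      simp only [List.tail_cons, List.zip_cons_cons, List.map_cons]
      rw [pv_slice_head x (y :: t) w hw0]
      rw [pv_cuts_shift x (y :: t) w W' hWn]
      rw [hw] at hsub
      simp only [List.zip_cons_cons, List.map_cons] at hsub
      have h1 := congrArg List.head? hsub
      have h2 := congrArg List.tail hsub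
      simp only [List.head?_cons, Option.some.injEq] at h1
      simp only [List.tail_cons] at h2
      rw [h1, h2]
      simp [pvSplitB, hne]

-- ===== VERDICT (by name: the statement is the Claim_ definition above) =====
theorem group_paragraphs_spec : Claim_equal_group_paragraphs := by
  intro blocks gap _ _
  unfold Spec_group_paragraphs group_paragraphs group_paragraphs_alt
  cases hs : PySem.List.sorted blocks (fun b => pvGetY b) with
  | nil => simp
  | cons x rest =>
    have hA := pv_foldA gap rest [] [] x
    have hB := pv_cutsB gap rest x
    simp only [List.isEmpty_cons, Bool.false_eq_true, if_false]
    rw [hB]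
    simpa [pvStepA] using hA
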